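-- pv_equiv track=rewrite | github.com/arieldelplata/proyectos | parser/afds.py | afd_comparison
-- ===== SOURCE A (Python) =====
-- def afd_comparison(cadena):
--     estados_sin_trampa = [0, 1, 2, 3]
--     estado_final = [1, 2, 3]
--     estado_no_final = [0]
--     estado_trampa = 't'
--     estado = 0
--     caracteres = ['<', '>', '=']
--     delta = {
--     0: {'<': 1, '>': 2, '=': 3},
--     1: {'<': 't', '>': 3, '=': 3},
--     2: {'<': 't', '>': 't', '=': 3},
--     3: {'<': 't', '>': 't', '=': 't'},
--     't': {'<': 't', '>': 't', '=': 't'}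
--     }
--
--     for caracter in cadena:
--         if (estado in estados_sin_trampa) and (caracter in caracteres):
--             estado = delta[estado][caracter]
--         elif (estado == 't') or not(caracter in caracteres):
--             estado = 't'
--             break
--     if estado in estado_final:
--             #estado_final=estado_final
--         estado_final='aceptado'
--     elif estado == estado_trampa:
--             #estado_final=estado_trampa
--         estado_final='trampa'
--     elif estado in estado_no_final:
--         #estado_final=estado_no_final
--         estado_final='no aceptado'
--     return estado_final
-- ===== SOURCE B (Python) =====
-- def afd_comparison(cadena):
--     # The DFA's accepted language is the finite set below; classify directly.
--     if cadena in ('<', '>', '=', '<>', '<=', '>='):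
--         return 'aceptado'
--     return 'no aceptado' if cadena == '' else 'trampa'
-- ===== Notes on version B (the rewrite author's own statement) =====
-- stated objective: simpler
-- what changed: Replaces the transition-table DFA simulation loop with a direct membership test against the DFA's finite accepted language (six short operator words) plus an empty-string check.
import Mathlib
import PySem

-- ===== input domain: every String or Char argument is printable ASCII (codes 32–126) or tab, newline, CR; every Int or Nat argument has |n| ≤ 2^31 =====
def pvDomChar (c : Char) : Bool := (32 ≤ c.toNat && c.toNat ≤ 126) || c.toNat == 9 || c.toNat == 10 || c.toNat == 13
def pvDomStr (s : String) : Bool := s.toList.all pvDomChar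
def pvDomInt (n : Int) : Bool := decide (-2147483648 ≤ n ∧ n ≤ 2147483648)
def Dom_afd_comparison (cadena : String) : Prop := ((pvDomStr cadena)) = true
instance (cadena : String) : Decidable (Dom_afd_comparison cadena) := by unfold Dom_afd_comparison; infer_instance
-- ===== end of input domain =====

-- B replaces A's transition-table DFA loop with a direct membership test against the DFA's finite language (simpler).


-- ===== PORT A =====
-- Python's estado is an int 0..3 or the string 't'; modelled by a 5-state inductive.
inductive AfdSt : Type
  | s0 | s1 | s2 | s3 | t
deriving DecidableEq, Repr

def afdCaracteres : List Char := ['<', '>', '=']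

-- delta[estado][caracter], the literal transition table (only looked up with caracter ∈ afdCaracteres)
def afdDelta : AfdSt → Char → AfdSt
  | .s0, '<' => .s1
  | .s0, '>' => .s2
  | .s0, '=' => .s3
  | .s1, '<' => .t
  | .s1, '>' => .s3
  | .s1, '=' => .s3
  | .s2, '<' => .t
  | .s2, '>' => .t
  | .s2, '=' => .s3
  | _,   _   => .t   -- rows 3 and 't' map every caracter to 't'

-- the for-loop with its early break (break = return .t immediately)
def afdLoop : List Char → AfdSt → AfdSt
  | [], estado => estado
  | caracter :: rest, estado =>
    if estado ∈ ([.s0, .s1, .s2, .s3] : List AfdSt) ∧ caracter ∈ afdCaracteres then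
      afdLoop rest (afdDelta estado caracter)
    else if estado = .t ∨ ¬ (caracter ∈ afdCaracteres) then
      .t   -- estado = 't'; break
    else
      afdLoop rest estado   -- unreachable in Python too (neither branch taken)

def afd_comparison (cadena : String) : String :=
  let estado := afdLoop cadena.toList .s0
  if estado ∈ ([.s1, .s2, .s3] : List AfdSt) then "aceptado"
  else if estado = .t then "trampa"
  else "no aceptado"   -- estado ∈ estado_no_final = [0]; the 5 states are exhausted above

-- ===== PORT B =====
def afd_comparison_alt (cadena : String) : String :=
  if cadena ∈ (["<", ">", "=", "<>", "<=", ">="] : List String) then "aceptado"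
  else if cadena = "" then "no aceptado"
  else "trampa"

-- ===== PRECONDITION & SPEC =====
def Spec_afd_comparison (cadena : String) (out : String) : Prop := out = afd_comparison_alt cadena
instance (cadena : String) (out : String) : Decidable (Spec_afd_comparison cadena out) := by unfold Spec_afd_comparison; infer_instance

-- ===== CLAIM (what is proved, stated in full; the proofs are below) =====
def Claim_equal_afd_comparison : Prop := ∀ (cadena : String), Dom_afd_comparison cadena → Spec_afd_comparison cadena (afd_comparison cadena)

-- ===== LEMMAS AND PROOFS =====

-- once in the trap state, the loop stays (and breaks) there
theorem afdLoop_t : ∀ (l : List Char), afdLoop l AfdSt.t = AfdSt.t := by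
  intro l
  cases l with
  | nil => rfl
  | cons c cs => simp [afdLoop]

-- from state 3, any further character traps
theorem afdLoop_s3 (c : Char) (cs : List Char) : afdLoop (c :: cs) AfdSt.s3 = AfdSt.t := by
  by_cases h : c ∈ afdCaracteres
  · have hd : afdDelta AfdSt.s3 c = AfdSt.t := by
      fin_cases h <;> rfl
    simp [afdLoop, h, hd, afdLoop_t]
  · simp [afdLoop, h]

-- list-level form of the equivalence
theorem afd_eq_list (l : List Char) :
    afd_comparison (String.ofList l) = afd_comparison_alt (String.ofList l) := by
  have hx : ∀ (s t : String), (s = t) = (s.toList = t.toList) := by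
    intro s t; simp [String.ext_iff]
  match l with
  | [] => rfl
  | [a] =>
    by_cases ha : a ∈ afdCaracteres
    · fin_cases ha <;> rfl
    · simp only [afdCaracteres, List.mem_cons, List.not_mem_nil, or_false] at ha
      push Not at ha
      obtain ⟨h1, h2, h3⟩ := ha
      simp [afd_comparison, afd_comparison_alt, afdLoop, afdCaracteres, hx,
        h1, h2, h3]
  | [a, b] =>
    by_cases ha : a ∈ afdCaracteres
    · by_cases hb : b ∈ afdCaracteres
      · fin_cases ha <;> fin_cases hb <;> rfl
      · simp only [afdCaracteres, List.mem_cons, List.not_mem_nil, or_false] at hb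
        push Not at hb
        obtain ⟨h1, h2, h3⟩ := hb
        fin_cases ha <;>
          simp [afd_comparison, afd_comparison_alt, afdLoop, afdDelta, afdCaracteres, hx,
            h1, h2, h3]
    · simp only [afdCaracteres, List.mem_cons, List.not_mem_nil, or_false] at ha
      push Not at ha
      obtain ⟨h1, h2, h3⟩ := ha
      simp [afd_comparison, afd_comparison_alt, afdLoop, afdCaracteres, hx, h1, h2, h3]
  | a :: b :: c :: rest =>
    -- length ≥ 3: A always ends trapped, B rejects (not in the finite language, nonempty)
    have step : ∀ (st : AfdSt) (x : Char) (xs : List Char), st ≠ .t → x ∈ afdCaracteres →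
        afdLoop (x :: xs) st = afdLoop xs (afdDelta st x) := by
      intro st x xs hst hx
      cases st <;> simp [afdLoop, hx] <;> simp at hst
    have invalid : ∀ (st : AfdSt) (x : Char) (xs : List Char), x ∉ afdCaracteres →
        afdLoop (x :: xs) st = AfdSt.t := by
      intro st x xs hx
      simp [afdLoop, hx]
    have hA : afdLoop (a :: b :: c :: rest) AfdSt.s0 = AfdSt.t := by
      by_cases ha : a ∈ afdCaracteres
      · rw [step _ _ _ (by simp) ha]
        by_cases hb : b ∈ afdCaracteres
        · have h1 : afdDelta AfdSt.s0 a ≠ AfdSt.t := by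
            fin_cases ha <;> simp [afdDelta]
          rw [step _ _ _ h1 hb]
          have h2 : afdDelta (afdDelta AfdSt.s0 a) b = AfdSt.s3 ∨
              afdDelta (afdDelta AfdSt.s0 a) b = AfdSt.t := by
            fin_cases ha <;> fin_cases hb <;> simp [afdDelta]
          rcases h2 with h2 | h2 <;> rw [h2]
          · exact afdLoop_s3 c rest
          · exact afdLoop_t _
        · exact invalid _ _ _ hb
      · exact invalid _ _ _ ha
    simp [afd_comparison, afd_comparison_alt, hA, hx]

-- ===== VERDICT (by name: the statement is the Claim_ definition above) =====
theorem afd_comparison_spec : Claim_equal_afd_comparison := by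
  intro cadena _
  unfold Spec_afd_comparison
  have h : cadena = String.ofList cadena.toList := by simp
  rw [h]
  exact afd_eq_list cadena.toList
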